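-- pv_equiv track=rewrite | github.com/Justinshakes/PythonPublic | Courses/cs50P/lecture2/problemSet/review.py | check_numbers_at_end
-- ===== SOURCE A (Python) =====
-- def check_numbers_at_end(plate):
--     found_number = False
--
--     for i in range(2, len(plate)):
--         if plate[i].isnumeric() and not found_number and plate[i] == "0":
--             return False
--         if plate[i].isalpha() and found_number:
--             return False
--         if plate[i].isnumeric() and not found_number:
--             found_number = True
--
--     return True
-- ===== SOURCE B (Python) =====
-- def check_numbers_at_end(plate):
--     tail = [c for c in plate[2:] if c.isnumeric() or c.isalpha()]
--     k = 0
--     while k < len(tail) and not tail[k].isnumeric():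
--         k += 1
--     tail = tail[k:]
--     return tail[:1] != ["0"] and all(c.isnumeric() for c in tail)
-- ===== Notes on version B (the rewrite author's own statement) =====
-- stated objective: alternative
-- what changed: Replaced A's stateful single-pass flag scan (with early returns) by a declarative filtered-sequence characterization: filter plate[2:] to its alphanumeric characters, drop the leading letters, and accept iff the remainder consists entirely of digits and has a nonzero first digit.
import Mathlib
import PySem

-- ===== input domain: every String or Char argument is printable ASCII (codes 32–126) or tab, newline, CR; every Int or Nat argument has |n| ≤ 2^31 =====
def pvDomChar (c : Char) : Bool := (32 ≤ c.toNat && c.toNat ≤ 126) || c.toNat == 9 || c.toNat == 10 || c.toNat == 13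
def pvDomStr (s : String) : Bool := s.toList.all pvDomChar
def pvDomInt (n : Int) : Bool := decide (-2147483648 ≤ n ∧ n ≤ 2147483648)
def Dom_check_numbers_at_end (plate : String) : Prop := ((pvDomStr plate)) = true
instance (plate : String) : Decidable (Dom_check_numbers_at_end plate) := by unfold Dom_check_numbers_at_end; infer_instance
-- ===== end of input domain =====

-- B replaces A's stateful flag scan by a declarative characterization (filter alnum, drop
-- leading letters, remainder must be all digits not starting with '0'); alternative, same cost.

-- ===== PORT A =====
-- A's for-loop over range(2, len(plate)) with the found_number flag, as structural recursion
-- over the characters from index 2 onward carrying the flag.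
def pvLoopA : List Char → Bool → Bool
  | [], _ => true
  | c :: cs, found =>
    if PySem.Chars.isdigit c && !found && (c == '0') then false
    else if PySem.Chars.isalpha c && found then false
    else pvLoopA cs (if PySem.Chars.isdigit c && !found then true else found)

def check_numbers_at_end (plate : String) : Bool :=
  pvLoopA (plate.toList.drop 2) false

-- ===== PORT B =====
-- Source B's while-loop advancing k past the leading non-digit characters
def pvCountLead : List Char → Nat
  | [] => 0
  | c :: cs => if !PySem.Chars.isdigit c then pvCountLead cs + 1 else 0

def check_numbers_at_end_alt (plate : String) : Bool :=
  let tail := (plate.toList.drop 2).filter (fun c => PySem.Chars.isdigit c || PySem.Chars.isalpha c)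
  let tail2 := tail.drop (pvCountLead tail)
  decide (tail2.take 1 ≠ ['0']) && tail2.all PySem.Chars.isdigit

-- ===== PRECONDITION & SPEC =====
def Spec_check_numbers_at_end (plate : String) (out : Bool) : Prop := out = check_numbers_at_end_alt plate
instance (plate : String) (out : Bool) : Decidable (Spec_check_numbers_at_end plate out) := by unfold Spec_check_numbers_at_end; infer_instance

-- ===== CLAIM =====
def Claim_equal_check_numbers_at_end : Prop := ∀ (plate : String), Dom_check_numbers_at_end plate → Spec_check_numbers_at_end plate (check_numbers_at_end plate)

-- ===== LEMMAS AND PROOFS =====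

-- a digit character is never alphabetic
theorem pv_digit_not_alpha (c : Char) (hd : PySem.Chars.isdigit c = true) :
    PySem.Chars.isalpha c = false := by
  simp only [PySem.Chars.isdigit, Bool.and_eq_true, decide_eq_true_eq] at hd
  simp only [PySem.Chars.isalpha, PySem.Chars.isupper, PySem.Chars.islower,
    Bool.or_eq_false_iff, Bool.and_eq_false_iff, decide_eq_false_iff_not]
  exact ⟨Or.inl fun h => absurd (le_trans h hd.2) (by decide),
         Or.inl fun h => absurd (le_trans h hd.2) (by decide)⟩

-- B's value on a character list (the body of check_numbers_at_end_alt after the drop 2)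
def pvB (cs : List Char) : Bool :=
  let tail := cs.filter (fun c => PySem.Chars.isdigit c || PySem.Chars.isalpha c)
  let tail2 := tail.drop (pvCountLead tail)
  decide (tail2.take 1 ≠ ['0']) && tail2.all PySem.Chars.isdigit

-- with the flag set, A's loop accepts iff no alphabetic char remains,
-- i.e. iff every alnum char remaining is a digit
theorem pvLoopA_true (cs : List Char) :
    pvLoopA cs true =
      (cs.filter (fun c => PySem.Chars.isdigit c || PySem.Chars.isalpha c)).all
        PySem.Chars.isdigit := by
  induction cs with
  | nil => rfl
  | cons c cs ih =>
    by_cases ha : PySem.Chars.isalpha c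
    · have hd : PySem.Chars.isdigit c = false := by
        by_contra h
        simp [pv_digit_not_alpha c (by simpa using h)] at ha
      simp [pvLoopA, List.filter, ha, hd]
    · by_cases hd : PySem.Chars.isdigit c
      · simp [pvLoopA, List.filter, ha, hd, ih]
      · simp [pvLoopA, List.filter, ha, hd, ih]

-- with the flag clear, A's loop equals B's filter/drop/all characterization
theorem pvLoopA_false (cs : List Char) : pvLoopA cs false = pvB cs := by
  induction cs with
  | nil => rfl
  | cons c cs ih =>
    by_cases hd : PySem.Chars.isdigit c
    · have ha := pv_digit_not_alpha c hd
      by_cases hz : c = '0'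
      · subst hz; simp [pvLoopA, pvB, List.filter, hd, pvCountLead]
      · simp [pvLoopA, pvB, List.filter, hd, ha, hz, pvCountLead, pvLoopA_true,
          List.take]
    · by_cases ha : PySem.Chars.isalpha c
      · simpa [pvLoopA, pvB, List.filter, hd, ha, pvCountLead, List.drop_succ_cons] using ih
      · simpa [pvLoopA, pvB, List.filter, hd, ha] using ih

-- ===== VERDICT =====
theorem check_numbers_at_end_spec : Claim_equal_check_numbers_at_end := by
  intro plate _
  unfold Spec_check_numbers_at_end check_numbers_at_end check_numbers_at_end_alt
  exact pvLoopA_false _
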